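-- pv_equiv track=rewrite | github.com/AngelGugliuzzo/angel-code | practico2 entregado/ejercicio12recuV2.py | combinaciones
-- ===== SOURCE A (Python) =====
-- def combinaciones(lista,num):
--     listaDeSalida = []
--     cadenaSalida=[]
--
--     if num >= 0:
--         for cont2 in range(0,len(lista)):
--             listaDeSalida.append( lista[num] + lista[cont2])
--         listaDeSalida = listaDeSalida + combinaciones(lista, num - 1)
--
--     #cadenaSalida=sorted(listaDeSalida)
--     #cadenaSalida = "".join(listaDeSalida)
--
--     return(sorted(listaDeSalida))
-- ===== SOURCE B (Python) =====
-- def combinaciones(lista, num):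
--     # Iterative re-implementation: flat nested loops + one final sort
--     # (A recurses and re-sorts at every level).
--     out = []
--     for i in range(num + 1):
--         for j in range(len(lista)):
--             out.append(lista[i] + lista[j])
--     return sorted(out)
-- ===== Notes on version B (the rewrite author's own statement) =====
-- stated objective: simpler
-- what changed: Replaces A's recursion on num (which sorts the partial result at every recursion level) by a flat double loop collecting all sums lista[i]+lista[j] for 0<=i<=num, sorted once at the end.
import Mathlib
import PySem

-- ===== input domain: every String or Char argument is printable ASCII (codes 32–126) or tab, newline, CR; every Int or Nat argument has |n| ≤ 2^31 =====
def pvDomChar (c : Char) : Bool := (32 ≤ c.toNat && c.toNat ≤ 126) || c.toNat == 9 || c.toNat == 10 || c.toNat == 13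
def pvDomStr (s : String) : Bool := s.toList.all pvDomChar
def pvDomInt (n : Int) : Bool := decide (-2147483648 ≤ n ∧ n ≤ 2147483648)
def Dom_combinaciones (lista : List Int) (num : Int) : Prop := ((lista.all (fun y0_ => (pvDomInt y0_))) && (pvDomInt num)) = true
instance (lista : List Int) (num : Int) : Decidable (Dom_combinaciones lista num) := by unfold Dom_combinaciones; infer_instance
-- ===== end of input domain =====

-- B replaces A's per-level recursion (with a sort at every level) by a flat double loop
-- over (i, j) and a single final sort; objective: simpler.


-- ===== PORT A =====
-- Literal port of A: recursion on num, appending lista[num]+lista[cont2] for each cont2,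
-- concatenating the recursive result, and sorting at every level.
-- (On inputs where Python raises IndexError — excluded by Pre_ — pyGet? is defaulted to 0.)
def combinaciones (lista : List Int) (num : Int) : List Int :=
  if 0 ≤ num then
    let listaDeSalida :=
      (PySem.List.pyRange 0 lista.length).foldl
        (fun acc cont2 =>
          acc ++ [(PySem.List.pyGet? lista num).getD 0 + (PySem.List.pyGet? lista cont2).getD 0]) []
    PySem.List.sorted (listaDeSalida ++ combinaciones lista (num - 1)) (fun x => x)
  else
    PySem.List.sorted ([] ++ ([] : List Int)) (fun x => x)
termination_by (num + 1).toNat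
decreasing_by omega

-- ===== PORT B =====
-- Port of B: flat double loop accumulating all sums, one sort at the end.
def combinaciones_alt (lista : List Int) (num : Int) : List Int :=
  PySem.List.sorted
    ((PySem.List.pyRange 0 (num + 1)).foldl
      (fun acc i =>
        (PySem.List.pyRange 0 lista.length).foldl
          (fun acc2 j =>
            acc2 ++ [(PySem.List.pyGet? lista i).getD 0 + (PySem.List.pyGet? lista j).getD 0]) acc)
      [])
    (fun x => x)

-- ===== PRECONDITION & SPEC =====
-- Pre_ excludes exactly the inputs where Python A raises IndexError (lista[num] with
-- num ≥ len(lista) on a nonempty lista); B raises the same IndexError there.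
def Pre_combinaciones (lista : List Int) (num : Int) : Prop :=
  num < lista.length ∨ lista = []
instance (lista : List Int) (num : Int) : Decidable (Pre_combinaciones lista num) := by
  unfold Pre_combinaciones; infer_instance

def pvWitness_combinaciones : List Int × Int := ([1, 2, 3], 2)

def Spec_combinaciones (lista : List Int) (num : Int) (out : List Int) : Prop := out = combinaciones_alt lista num
instance (lista : List Int) (num : Int) (out : List Int) : Decidable (Spec_combinaciones lista num out) := by unfold Spec_combinaciones; infer_instance

-- ===== CLAIM (what is proved, stated in full; the proofs are below) =====
def Claim_equal_combinaciones : Prop := ∀ (lista : List Int) (num : Int), Dom_combinaciones lista num → Pre_combinaciones lista num → Spec_combinaciones lista num (combinaciones lista num)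

-- ===== LEMMAS AND PROOFS =====

-- Generic shape of both programs' append loops.
theorem foldl_app_g {α : Type} (F : Int → List α → List α) (g : Int → List α)
    (hF : ∀ i a, F i a = a ++ g i) :
    ∀ (r : List Int) (a : List α),
      r.foldl (fun acc x => F x acc) a = a ++ r.flatMap g := by
  intro r
  induction r with
  | nil => intro a; simp
  | cons x t ih => intro a; simp [List.foldl, hF, List.flatMap]

-- flatMap of singletons is map.
theorem flatMap_single (l : List Int) (f : Int → Int) : l.flatMap (fun j => [f j]) = l.map f := by
  induction l with
  | nil => rfl
  | cons x t ih => simp [List.flatMap_cons, ih]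

-- The bag of sums B collects before sorting.
def pvBag (lista : List Int) (num : Int) : List Int :=
  (PySem.List.pyRange 0 (num + 1)).flatMap
    (fun i => (PySem.List.pyRange 0 lista.length).map
      (fun j => (PySem.List.pyGet? lista i).getD 0 + (PySem.List.pyGet? lista j).getD 0))

theorem bag_step (lista : List Int) (num : Int) (h : 0 ≤ num) :
    pvBag lista num =
      pvBag lista (num - 1) ++
        (PySem.List.pyRange 0 lista.length).map
          (fun j => (PySem.List.pyGet? lista num).getD 0 + (PySem.List.pyGet? lista j).getD 0) := by
  have hn : num - 1 + 1 = num := by omega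
  unfold pvBag
  rw [hn, PySem.List.pyRange_one_append 0 num (num + 1) (by omega) (by omega),
      List.flatMap_append, PySem.List.pyRange_one_singleton]
  simp

-- A's result is a permutation of B's bag.
theorem combinaciones_perm_bag (lista : List Int) (num : Int) :
    (combinaciones lista num).Perm (pvBag lista num) := by
  by_cases h : 0 ≤ num
  · rw [combinaciones]
    simp only [h, if_true]
    refine (PySem.List.sorted_perm _ _ _).trans ?_
    rw [foldl_app_g _ (fun c => [(PySem.List.pyGet? lista num).getD 0 + (PySem.List.pyGet? lista c).getD 0]) (fun _ _ => rfl), List.nil_append]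
    have hflat : (PySem.List.pyRange 0 lista.length).flatMap
        (fun c => [(PySem.List.pyGet? lista num).getD 0 + (PySem.List.pyGet? lista c).getD 0]) =
        (PySem.List.pyRange 0 lista.length).map
          (fun j => (PySem.List.pyGet? lista num).getD 0 + (PySem.List.pyGet? lista j).getD 0) := by
      exact flatMap_single _ _
    rw [hflat, bag_step lista num h]
    exact (List.perm_append_comm).trans
      (List.Perm.append_right _ (combinaciones_perm_bag lista (num - 1)))
  · rw [combinaciones]
    simp only [h, if_false]
    have : pvBag lista num = [] := by
      unfold pvBag
      rw [PySem.List.pyRange_one_eq_nil (show num + 1 ≤ 0 by omega)]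
      simp
    rw [this]
    exact PySem.List.sorted_perm _ _ _
termination_by (num + 1).toNat
decreasing_by omega

-- B's port equals the sort of the bag.
theorem alt_eq_sorted_bag (lista : List Int) (num : Int) :
    combinaciones_alt lista num = PySem.List.sorted (pvBag lista num) (fun x => x) := by
  unfold combinaciones_alt pvBag
  congr 1
  rw [foldl_app_g _ (fun i => (PySem.List.pyRange 0 lista.length).map
        (fun j => (PySem.List.pyGet? lista i).getD 0 + (PySem.List.pyGet? lista j).getD 0))
      (fun i a => by
        rw [foldl_app_g _ (fun j => [(PySem.List.pyGet? lista i).getD 0 + (PySem.List.pyGet? lista j).getD 0]) (fun _ _ => rfl),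
            flatMap_single]),
    List.nil_append]

theorem combinaciones_sorted_eq (lista : List Int) (num : Int) :
    combinaciones lista num = PySem.List.sorted (combinaciones lista num) (fun x => x) := by
  by_cases h : 0 ≤ num
  · conv_lhs => rw [combinaciones]
    conv_rhs => rw [combinaciones]
    simp only [h, if_true]
    rw [PySem.List.sorted_sorted]
  · conv_lhs => rw [combinaciones]
    conv_rhs => rw [combinaciones]
    simp only [h, if_false]
    rw [PySem.List.sorted_sorted]

-- ===== VERDICT (by name: the statement is the Claim_ definition above) =====
theorem combinaciones_spec : Claim_equal_combinaciones := by
  intro lista num _ _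
  unfold Spec_combinaciones
  rw [alt_eq_sorted_bag, combinaciones_sorted_eq lista num]
  exact PySem.List.sorted_eq_sorted_of_perm _ _ (fun x => x) (fun a b h => h)
    (combinaciones_perm_bag lista num)
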